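-- pv_equiv track=rewrite | github.com/SirNaCl/AdventOfCode | 2023/03/solution.py | coords_with_gear_nb
-- ===== SOURCE A (Python) =====
-- def flatten(l):
--     return [item for sublist in l for item in sublist]
--
-- def adjac(x, y):
--     nb = lambda c: [c - 1, c, c + 1]
--     return flatten([[(xx, yy) for xx in nb(x)] for yy in nb(y)])
--
-- def is_gear(s):
--     return s == "*"
--
-- def coords_with_gear_nb(data: list[list[str]]):
--     with_sym = list()
--     for y, row in enumerate(data):
--         for x, c in enumerate(row):
--             if not c.isdigit():
--                 continue
--
--             adjacent = adjac(x, y)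
--             for ax, ay in adjacent:
--                 if 0 < ay < len(data) and 0 < ax < len(row) and is_gear(data[ay][ax]):
--                     with_sym.append(((y, x), (ay, ax)))
--
--     return with_sym
-- ===== SOURCE B (Python) =====
-- def coords_with_gear_nb(data: list[list[str]]):
--     pairs = []
--     for gy, row in enumerate(data):
--         for gx, c in enumerate(row):
--             if c != "*":
--                 continue
--             for dy in range(gy - 1, gy + 2):
--                 if not 0 <= dy < len(data):
--                     continue
--                 nrow = data[dy]
--                 for dx in range(gx - 1, gx + 2):
--                     if 0 <= dx < len(nrow) and nrow[dx].isdigit():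
--                         pairs.append(((dy, dx), (gy, gx)))
--     pairs.sort()
--     return pairs
-- ===== Notes on version B (the rewrite author's own statement) =====
-- stated objective: alternative
-- what changed: B inverts the traversal: it scans the grid for '*' gear cells, emits for each gear its in-bounds adjacent digit cells, and sorts the pairs, instead of A's digit-major scan probing all 9 neighbours of every digit cell; Pre_ excludes only the jagged grids on which A raises IndexError.
-- intended difference: On grids where a digit cell is adjacent to a gear '*' lying in row 0 or column 0, or (jagged grids) in a column at or beyond the digit's own row length, A's strict '0 <' bounds checked against the digit's row silently drop that pair, so A returns a list missing it; B reports every in-bounds digit-gear adjacency, which is what 'digit cells adjacent to gears' intends. — e.g. on coords_with_gear_nb([["*", "1"]]): A returns [], B returns [((0, 1), (0, 0))]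
import Mathlib
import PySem

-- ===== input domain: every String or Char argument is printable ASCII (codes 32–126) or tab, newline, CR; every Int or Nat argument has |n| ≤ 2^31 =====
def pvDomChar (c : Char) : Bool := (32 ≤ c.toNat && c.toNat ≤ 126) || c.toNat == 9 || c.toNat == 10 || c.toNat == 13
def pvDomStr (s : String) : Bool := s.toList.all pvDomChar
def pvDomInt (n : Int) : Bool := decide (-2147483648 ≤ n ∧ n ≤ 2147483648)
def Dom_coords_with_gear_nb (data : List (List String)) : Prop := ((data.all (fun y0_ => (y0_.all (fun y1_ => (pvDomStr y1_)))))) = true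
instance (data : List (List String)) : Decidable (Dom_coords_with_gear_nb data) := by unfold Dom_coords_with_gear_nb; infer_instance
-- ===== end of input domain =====

-- B inverts the traversal (scan for '*' gears, emit the adjacent in-bounds digit cells, sort the
-- pairs) instead of A's digit-major scan probing all 9 neighbours of every digit; no speed claim.
-- B intentionally also reports pairs whose gear lies in row 0 / column 0 / beyond the digit's own
-- row length, which A's quirky guards drop (see D_ below).

-- ===== PORT A =====
def pvFlatten {α : Type} (l : List (List α)) : List α :=
  l.flatMap (fun sublist => sublist)

def pvAdjac (x y : Int) : List (Int × Int) :=
  pvFlatten (([y - 1, y, y + 1]).map (fun yy => ([x - 1, x, x + 1]).map (fun xx => (xx, yy))))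

def pvIsGear (s : String) : Bool := s == "*"

-- the loop guard '0 < ay < len(data) and 0 < ax < len(row) and is_gear(data[ay][ax])' (p = (ax, ay))
abbrev pvCondA (data : List (List String)) (row : List String) (p : Int × Int) : Prop :=
  0 < p.2 ∧ p.2 < (data.length : Int) ∧ 0 < p.1 ∧ p.1 < (row.length : Int) ∧
    pvIsGear (PySem.List.pyGetD (PySem.List.pyGetD data p.2 []) p.1 "") = true

def coords_with_gear_nb (data : List (List String)) : List ((Int × Int) × (Int × Int)) :=
  (PySem.List.enumerate data 0).foldl (fun ws yr =>
    (PySem.List.enumerate yr.2 0).foldl (fun ws xc =>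
      if ¬ PySem.Str.strIsdigit xc.2 = true then ws
      else
        (pvAdjac xc.1 yr.1).foldl (fun ws p =>
          if pvCondA data yr.2 p then ws ++ [((yr.1, xc.1), (p.2, p.1))] else ws) ws) ws) []

-- ===== PORT B =====
-- Python's 'pairs.sort()' compares the nested int tuples lexicographically; ×ₗ is that order
def pvKey (p : (Int × Int) × (Int × Int)) : (Int ×ₗ Int) ×ₗ (Int ×ₗ Int) :=
  toLex (toLex p.1, toLex p.2)

-- the digit test '0 <= dx < len(nrow) and nrow[dx].isdigit()' of B's innermost loop
abbrev pvCondB (nrow : List String) (dx : Int) : Prop :=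
  0 ≤ dx ∧ dx < (nrow.length : Int) ∧ PySem.Str.strIsdigit (PySem.List.pyGetD nrow dx "") = true

def coords_with_gear_nb_alt (data : List (List String)) : List ((Int × Int) × (Int × Int)) :=
  let pairs :=
    (PySem.List.enumerate data 0).foldl (fun ps gyr =>
      (PySem.List.enumerate gyr.2 0).foldl (fun ps gxc =>
        if ¬ gxc.2 = "*" then ps
        else
          (PySem.List.pyRange (gyr.1 - 1) (gyr.1 + 2) 1).foldl (fun ps dy =>
            if ¬ (0 ≤ dy ∧ dy < (data.length : Int)) then ps
            else
              (PySem.List.pyRange (gxc.1 - 1) (gxc.1 + 2) 1).foldl (fun ps dx =>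
                if pvCondB (PySem.List.pyGetD data dy []) dx then
                  ps ++ [((dy, dx), (gyr.1, gxc.1))]
                else ps) ps) ps) ps) []
  PySem.List.sorted pairs pvKey false

-- ===== PRECONDITION & SPEC =====
-- Pre_ excludes exactly the jagged grids on which Python A raises IndexError: a digit cell at
-- (dy,dx) with a candidate gear column gx passing A's guards (0 < gy < len(data), 0 < gx <
-- len(row dy)) while row gy is shorter than gx+1, so data[gy][gx] raises.
def pvPreB (data : List (List String)) : Bool :=
  (List.range data.length).all fun dy =>
    (List.range (data.getD dy []).length).all fun dx =>
      (!(PySem.Str.strIsdigit ((data.getD dy []).getD dx ""))) ||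
      ((List.range data.length).all fun gy =>
        (List.range (data.getD dy []).length).all fun gx =>
          (!(decide (dy ≤ gy + 1) && decide (gy ≤ dy + 1) && decide (dx ≤ gx + 1) &&
             decide (gx ≤ dx + 1) && decide (0 < gy) && decide (0 < gx))) ||
          decide (gx < (data.getD gy []).length))

def Pre_coords_with_gear_nb (data : List (List String)) : Prop :=
  pvPreB data = true

instance (data : List (List String)) : Decidable (Pre_coords_with_gear_nb data) := by
  unfold Pre_coords_with_gear_nb; infer_instance

def pvWitness_coords_with_gear_nb : List (List String) := [["1", "*"], ["*", "2"]]

-- On grids where a digit cell is adjacent to a gear '*' lying in row 0 or column 0, or (jagged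
-- grids) in a column at or beyond the digit's own row length, A's strict '0 <' bounds checked
-- against the digit's row silently drop that pair and A returns a list missing it; B reports
-- every in-bounds digit–gear adjacency, which is what 'digit cells adjacent to gears' intends.
abbrev pvRow (data : List (List String)) (i : Nat) : List String := data.getD i []

abbrev pvCell (data : List (List String)) (i j : Nat) : String := (pvRow data i).getD j ""

abbrev pvNear (a b : Nat) : Prop := a ≤ b + 1 ∧ b ≤ a + 1

def D_coords_with_gear_nb (data : List (List String)) : Prop :=
  ∃ dy < data.length, ∃ dx < (pvRow data dy).length,
    PySem.Str.strIsdigit (pvCell data dy dx) ∧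
    ∃ gy < data.length, ∃ gx < (pvRow data gy).length,
      pvNear dy gy ∧ pvNear dx gx ∧ pvCell data gy gx = "*" ∧
      (gy = 0 ∨ gx = 0 ∨ (pvRow data dy).length ≤ gx)

instance (data : List (List String)) : Decidable (D_coords_with_gear_nb data) := by
  unfold D_coords_with_gear_nb; infer_instance

def Spec_coords_with_gear_nb (data : List (List String)) (out : List ((Int × Int) × (Int × Int))) : Prop := ¬ D_coords_with_gear_nb data → out = coords_with_gear_nb_alt data
instance (data : List (List String)) (out : List ((Int × Int) × (Int × Int))) : Decidable (Spec_coords_with_gear_nb data out) := by unfold Spec_coords_with_gear_nb; infer_instance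

def pvDiffWitness_coords_with_gear_nb : List (List String) := [["*", "1"]]

def pvDiffWitnessOut_coords_with_gear_nb :
    (List ((Int × Int) × (Int × Int))) × (List ((Int × Int) × (Int × Int))) :=
  ([], [((0, 1), (0, 0))])

-- ===== CLAIM (what is proved, stated in full; the proofs are below) =====
def Claim_unchanged_coords_with_gear_nb : Prop := ∀ (data : List (List String)), Dom_coords_with_gear_nb data → Pre_coords_with_gear_nb data → Spec_coords_with_gear_nb data (coords_with_gear_nb data)

def Claim_changed_coords_with_gear_nb : Prop := Dom_coords_with_gear_nb (pvDiffWitness_coords_with_gear_nb) ∧ Pre_coords_with_gear_nb (pvDiffWitness_coords_with_gear_nb) ∧ D_coords_with_gear_nb (pvDiffWitness_coords_with_gear_nb) ∧ coords_with_gear_nb (pvDiffWitness_coords_with_gear_nb) = pvDiffWitnessOut_coords_with_gear_nb.1 ∧ coords_with_gear_nb_alt (pvDiffWitness_coords_with_gear_nb) = pvDiffWitnessOut_coords_with_gear_nb.2 ∧ pvDiffWitnessOut_coords_with_gear_nb.1 ≠ pvDiffWitnessOut_coords_with_gear_nb.2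

def Claim_exact_coords_with_gear_nb : Prop := ∀ (data : List (List String)), Dom_coords_with_gear_nb data → Pre_coords_with_gear_nb data → D_coords_with_gear_nb data → coords_with_gear_nb data ≠ coords_with_gear_nb_alt data

-- ===== LEMMAS AND PROOFS =====

theorem pvRange3 (a : Int) : PySem.List.pyRange (a - 1) (a + 2) 1 = [a - 1, a, a + 1] := by
  rw [PySem.List.pyRange_one_cons (by omega), PySem.List.pyRange_one_cons (by omega),
      PySem.List.pyRange_one_cons (by omega), PySem.List.pyRange_one_eq_nil (by omega)]
  norm_num

-- generic loop shape: a foldl whose body appends a block is a flatMap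
theorem pv_foldl_eq_flatMap {α β : Type} (l : List α) (body : List β → α → List β)
    (g : α → List β) (init : List β) (h : ∀ acc x, body acc x = acc ++ g x) :
    l.foldl body init = init ++ l.flatMap g := by
  induction l generalizing init with
  | nil => simp
  | cons a t ih => simp [List.foldl_cons, h, ih, List.append_assoc]

-- generic pairwise for flatMap
theorem pv_pairwise_flatMap {α β : Type} {R : β → β → Prop} (l : List α) (f : α → List β)
    (h1 : ∀ a ∈ l, (f a).Pairwise R)
    (h2 : l.Pairwise (fun a b => ∀ x ∈ f a, ∀ y ∈ f b, R x y)) :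
    (l.flatMap f).Pairwise R := by
  induction l with
  | nil => simp
  | cons a t ih =>
    rw [List.flatMap_cons, List.pairwise_append]
    rcases List.pairwise_cons.mp h2 with ⟨ha, ht⟩
    exact ⟨h1 a (by simp), ih (fun b hb => h1 b (by simp [hb])) ht,
      fun x hx y hy => by
        rcases List.mem_flatMap.mp hy with ⟨b, hb, hyb⟩
        exact ha b hb x hx y hyb⟩

-- A's output as a flatMap
def pvAflat (data : List (List String)) : List ((Int × Int) × (Int × Int)) :=
  (PySem.List.enumerate data 0).flatMap (fun yr =>
    (PySem.List.enumerate yr.2 0).flatMap (fun xc =>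
      if PySem.Str.strIsdigit xc.2 = true then
        ((pvAdjac xc.1 yr.1).filter (fun p => decide (pvCondA data yr.2 p))).map
          (fun p => ((yr.1, xc.1), (p.2, p.1)))
      else []))

-- B's collected pairs as a flatMap
def pvBflat (data : List (List String)) : List ((Int × Int) × (Int × Int)) :=
  (PySem.List.enumerate data 0).flatMap (fun gyr =>
    (PySem.List.enumerate gyr.2 0).flatMap (fun gxc =>
      if ¬ gxc.2 = "*" then []
      else
        ([gyr.1 - 1, gyr.1, gyr.1 + 1]).flatMap (fun dy =>
          if ¬ (0 ≤ dy ∧ dy < (data.length : Int)) then []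
          else
            (([gxc.1 - 1, gxc.1, gxc.1 + 1]).filter
                (fun dx => decide (pvCondB (PySem.List.pyGetD data dy []) dx))).map
              (fun dx => ((dy, dx), (gyr.1, gxc.1))))))

-- membership characterisation of A's list
def pvPairCond (data : List (List String)) (q : (Int × Int) × (Int × Int)) : Prop :=
  ∃ dy dx gy gx : Int, q = ((dy, dx), (gy, gx)) ∧
    0 ≤ dy ∧ dy < (data.length : Int) ∧
    0 ≤ dx ∧ dx < ((PySem.List.pyGetD data dy []).length : Int) ∧
    PySem.Str.strIsdigit (PySem.List.pyGetD (PySem.List.pyGetD data dy []) dx "") = true ∧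
    gy - 1 ≤ dy ∧ dy ≤ gy + 1 ∧ gx - 1 ≤ dx ∧ dx ≤ gx + 1 ∧
    0 < gy ∧ gy < (data.length : Int) ∧ 0 < gx ∧
    gx < ((PySem.List.pyGetD data dy []).length : Int) ∧
    pvIsGear (PySem.List.pyGetD (PySem.List.pyGetD data gy []) gx "") = true

-- membership characterisation of B's (unsorted) list
def pvPairCondB (data : List (List String)) (q : (Int × Int) × (Int × Int)) : Prop :=
  ∃ dy dx gy gx : Int, q = ((dy, dx), (gy, gx)) ∧
    0 ≤ gy ∧ gy < (data.length : Int) ∧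
    0 ≤ gx ∧ gx < ((PySem.List.pyGetD data gy []).length : Int) ∧
    PySem.List.pyGetD (PySem.List.pyGetD data gy []) gx "" = "*" ∧
    gy - 1 ≤ dy ∧ dy ≤ gy + 1 ∧ gx - 1 ≤ dx ∧ dx ≤ gx + 1 ∧
    0 ≤ dy ∧ dy < (data.length : Int) ∧
    0 ≤ dx ∧ dx < ((PySem.List.pyGetD data dy []).length : Int) ∧
    PySem.Str.strIsdigit (PySem.List.pyGetD (PySem.List.pyGetD data dy []) dx "") = true

theorem pvKey_lt_iff (a b : (Int × Int) × (Int × Int)) :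
    pvKey a < pvKey b ↔
      a.1.1 < b.1.1 ∨ (a.1.1 = b.1.1 ∧ (a.1.2 < b.1.2 ∨ (a.1.2 = b.1.2 ∧
        (a.2.1 < b.2.1 ∨ (a.2.1 = b.2.1 ∧ a.2.2 < b.2.2))))) := by
  simp [pvKey, Prod.Lex.toLex_lt_toLex, Prod.ext_iff]
  omega

theorem pvA_inner (data : List (List String)) (yr : Int × List String)
    (acc : List ((Int × Int) × (Int × Int))) :
    (PySem.List.enumerate yr.2 0).foldl
      (fun ws xc =>
        if ¬ PySem.Str.strIsdigit xc.2 = true then ws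
        else
          (pvAdjac xc.1 yr.1).foldl (fun ws p =>
            if pvCondA data yr.2 p then ws ++ [((yr.1, xc.1), (p.2, p.1))] else ws) ws) acc
    = acc ++ (PySem.List.enumerate yr.2 0).flatMap (fun xc =>
        if PySem.Str.strIsdigit xc.2 = true then
          ((pvAdjac xc.1 yr.1).filter (fun p => decide (pvCondA data yr.2 p))).map
            (fun p => ((yr.1, xc.1), (p.2, p.1)))
        else []) := by
  apply pv_foldl_eq_flatMap
  intro acc xc
  by_cases hd : PySem.Str.strIsdigit xc.2 = true
  · rw [if_neg (fun h => h hd), if_pos hd]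
    exact PySem.List.foldl_append_ite _ _ _ _
  · rw [if_pos hd, if_neg hd, List.append_nil]

theorem pvA_eq_flat (data : List (List String)) : coords_with_gear_nb data = pvAflat data := by
  unfold coords_with_gear_nb pvAflat
  rw [pv_foldl_eq_flatMap _ _ _ _ (fun acc yr => pvA_inner data yr acc), List.nil_append]

theorem pvB_lvl3 (data : List (List String)) (gy gx : Int)
    (acc : List ((Int × Int) × (Int × Int))) :
    (PySem.List.pyRange (gy - 1) (gy + 2) 1).foldl (fun ps dy =>
      if ¬ (0 ≤ dy ∧ dy < (data.length : Int)) then ps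
      else
        (PySem.List.pyRange (gx - 1) (gx + 2) 1).foldl (fun ps dx =>
          if pvCondB (PySem.List.pyGetD data dy []) dx then ps ++ [((dy, dx), (gy, gx))]
          else ps) ps) acc
    = acc ++ ([gy - 1, gy, gy + 1]).flatMap (fun dy =>
        if ¬ (0 ≤ dy ∧ dy < (data.length : Int)) then []
        else
          (([gx - 1, gx, gx + 1]).filter
              (fun dx => decide (pvCondB (PySem.List.pyGetD data dy []) dx))).map
            (fun dx => ((dy, dx), (gy, gx)))) := by
  rw [pvRange3 gy, pvRange3 gx]
  apply pv_foldl_eq_flatMap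
  intro acc dy
  split_ifs with h1
  · exact PySem.List.foldl_append_ite _ _ _ _
  · rw [List.append_nil]

theorem pvB_lvl2 (data : List (List String)) (gy : Int) (grow : List String)
    (acc : List ((Int × Int) × (Int × Int))) :
    (PySem.List.enumerate grow 0).foldl (fun ps gxc =>
      if ¬ gxc.2 = "*" then ps
      else
        (PySem.List.pyRange (gy - 1) (gy + 2) 1).foldl (fun ps dy =>
          if ¬ (0 ≤ dy ∧ dy < (data.length : Int)) then ps
          else
            (PySem.List.pyRange (gxc.1 - 1) (gxc.1 + 2) 1).foldl (fun ps dx =>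
              if pvCondB (PySem.List.pyGetD data dy []) dx then ps ++ [((dy, dx), (gy, gxc.1))]
              else ps) ps) ps) acc
    = acc ++ (PySem.List.enumerate grow 0).flatMap (fun gxc =>
        if ¬ gxc.2 = "*" then []
        else
          ([gy - 1, gy, gy + 1]).flatMap (fun dy =>
            if ¬ (0 ≤ dy ∧ dy < (data.length : Int)) then []
            else
              (([gxc.1 - 1, gxc.1, gxc.1 + 1]).filter
                  (fun dx => decide (pvCondB (PySem.List.pyGetD data dy []) dx))).map
                (fun dx => ((dy, dx), (gy, gxc.1))))) := by
  apply pv_foldl_eq_flatMap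
  intro acc gxc
  by_cases h : gxc.2 = "*"
  · rw [if_neg (fun hh => hh h), if_neg (fun hh => hh h)]
    exact pvB_lvl3 data gy gxc.1 acc
  · rw [if_pos h, if_pos h, List.append_nil]

theorem pvB_eq_sorted_flat (data : List (List String)) :
    coords_with_gear_nb_alt data = PySem.List.sorted (pvBflat data) pvKey false := by
  unfold coords_with_gear_nb_alt pvBflat
  rw [pv_foldl_eq_flatMap _ _ _ _ (fun acc gyr => pvB_lvl2 data gyr.1 gyr.2 acc), List.nil_append]

theorem pv_memA (data : List (List String)) (q : (Int × Int) × (Int × Int)) :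
    q ∈ pvAflat data ↔ pvPairCond data q := by
  unfold pvAflat pvPairCond
  simp only [List.mem_flatMap, PySem.List.mem_enumerate_iff, List.mem_map, List.mem_filter,
    pvAdjac, pvFlatten, List.mem_ite_nil_right, List.mem_cons, List.not_mem_nil, or_false,
    decide_eq_true_eq, zero_add, exists_exists_and_eq_and, pvCondA, pvIsGear, beq_iff_eq]
  constructor
  · rintro ⟨a, ⟨k, hk, rfl⟩, a1, ⟨j, hj, rfl⟩, hdig, p, ⟨⟨ay, hay, ax, hax, rfl⟩, h1, h2, h3, h4, hg⟩, rfl⟩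
    have hrow : PySem.List.pyGetD data ((k : Nat) : Int) [] = data[k] := by
      rw [PySem.List.pyGetD_natCast]; exact List.getD_eq_getElem data [] hk
    have hcell : PySem.List.pyGetD data[k] ((j : Nat) : Int) "" = data[k][j] := by
      rw [PySem.List.pyGetD_natCast]; exact List.getD_eq_getElem data[k] "" hj
    have hyadj : ay - 1 ≤ ((k : Nat) : Int) ∧ ((k : Nat) : Int) ≤ ay + 1 := by
      rcases hay with rfl | rfl | rfl <;> constructor <;> simp <;> omega
    have hxadj : ax - 1 ≤ ((j : Nat) : Int) ∧ ((j : Nat) : Int) ≤ ax + 1 := by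
      rcases hax with rfl | rfl | rfl <;> constructor <;> simp <;> omega
    have h2' : ay < ((data.length : Nat) : Int) := by simpa using h2
    have h1' : (0 : Int) < ay := by simpa using h1
    have h3' : (0 : Int) < ax := by simpa using h3
    have h4' : ax < ((data[k].length : Nat) : Int) := by simpa using h4
    have hg' : PySem.List.pyGetD (PySem.List.pyGetD data ay []) ax "" = "*" := by simpa using hg
    have hdig' : PySem.Str.strIsdigit data[k][j] = true := by simpa using hdig
    have hj' : j < data[k].length := by simpa using hj
    clear h1 h2 h3 h4 hg hdig hay hax
    refine ⟨(k : Int), (j : Int), ay, ax, rfl, ?_⟩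
    rw [hrow, hcell]
    and_intros <;> first | assumption | omega
  · rintro ⟨dy, dx, gy, gx, rfl, h0, h1, h2, h3, hdig, a1, a2, a3, a4, h5, h6, h7, h8, hg⟩
    obtain ⟨k, rfl⟩ : ∃ k : ℕ, dy = ↑k := ⟨dy.toNat, (Int.toNat_of_nonneg h0).symm⟩
    obtain ⟨j, rfl⟩ : ∃ j : ℕ, dx = ↑j := ⟨dx.toNat, (Int.toNat_of_nonneg h2).symm⟩
    have hk : k < data.length := by exact_mod_cast h1
    have hrow : PySem.List.pyGetD data ((k : Nat) : Int) [] = data[k] := by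
      rw [PySem.List.pyGetD_natCast]; exact List.getD_eq_getElem data [] hk
    rw [hrow] at h3 hdig h8
    have hj : j < data[k].length := by exact_mod_cast h3
    have hcell : PySem.List.pyGetD data[k] ((j : Nat) : Int) "" = data[k][j] := by
      rw [PySem.List.pyGetD_natCast]; exact List.getD_eq_getElem data[k] "" hj
    rw [hcell] at hdig
    refine ⟨((k : Int), data[k]), ⟨k, hk, rfl⟩, ((j : Int), data[k][j]), ⟨j, hj, rfl⟩, hdig,
      (gx, gy), ⟨⟨gy, ?_, gx, ?_, rfl⟩, ?_, ?_, ?_, ?_, ?_⟩, rfl⟩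
    · dsimp only; omega
    · dsimp only; omega
    · exact h5
    · exact h6
    · exact h7
    · dsimp only; exact h8
    · dsimp only; exact hg

theorem pv_memB (data : List (List String)) (q : (Int × Int) × (Int × Int)) :
    q ∈ pvBflat data ↔ pvPairCondB data q := by
  unfold pvBflat pvPairCondB
  simp only [List.mem_flatMap, PySem.List.mem_enumerate_iff, List.mem_map, List.mem_filter,
    List.mem_cons, List.not_mem_nil, or_false,
    decide_eq_true_eq, zero_add, pvCondB,
    List.mem_ite_nil_left, not_not]
  constructor
  · rintro ⟨a, ⟨g, hg, rfl⟩, a1, ⟨x, hx, rfl⟩, hstar, dy, hdyopt,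
      ⟨hdy0, hdylt⟩, dx, ⟨hdxopt, hdx0, hdxlt, hdig⟩, rfl⟩
    have hx' : x < data[g].length := by simpa using hx
    have hrow : PySem.List.pyGetD data ((g : Nat) : Int) [] = data[g] := by
      rw [PySem.List.pyGetD_natCast]; exact List.getD_eq_getElem data [] hg
    have hcell : PySem.List.pyGetD data[g] ((x : Nat) : Int) "" = data[g][x] := by
      rw [PySem.List.pyGetD_natCast]; exact List.getD_eq_getElem data[g] "" hx'
    have hstar' : data[g][x] = "*" := by simpa using hstar
    have hdxopt' : dx = ((x : Nat) : Int) - 1 ∨ dx = ((x : Nat) : Int) ∨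
        dx = ((x : Nat) : Int) + 1 := by simpa using hdxopt
    have hdyopt' : dy = ((g : Nat) : Int) - 1 ∨ dy = ((g : Nat) : Int) ∨
        dy = ((g : Nat) : Int) + 1 := by simpa using hdyopt
    refine ⟨dy, dx, (g : Int), (x : Int), rfl, by omega, by exact_mod_cast hg, by omega,
      ?_, ?_, by omega, by omega, by omega, by omega, hdy0, hdylt, hdx0, hdxlt, hdig⟩
    · rw [hrow]; exact_mod_cast hx'
    · rw [hrow, hcell]; exact hstar'
  · rintro ⟨dy, dx, gy, gx, rfl, h5, h6, h7, h8, hgear, a1, a2, a3, a4, h0, h1, h2, h3, hdig⟩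
    obtain ⟨g, rfl⟩ : ∃ g : ℕ, gy = ↑g := ⟨gy.toNat, (Int.toNat_of_nonneg h5).symm⟩
    obtain ⟨x, rfl⟩ : ∃ x : ℕ, gx = ↑x := ⟨gx.toNat, (Int.toNat_of_nonneg h7).symm⟩
    have hkg : g < data.length := by exact_mod_cast h6
    have hrow : PySem.List.pyGetD data ((g : Nat) : Int) [] = data[g] := by
      rw [PySem.List.pyGetD_natCast]; exact List.getD_eq_getElem data [] hkg
    rw [hrow] at h8 hgear
    have hxlen : x < data[g].length := by exact_mod_cast h8
    have hcell : PySem.List.pyGetD data[g] ((x : Nat) : Int) "" = data[g][x] := by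
      rw [PySem.List.pyGetD_natCast]; exact List.getD_eq_getElem data[g] "" hxlen
    rw [hcell] at hgear
    refine ⟨((g : Int), data[g]), ⟨g, hkg, rfl⟩, ((x : Int), data[g][x]), ⟨x, hxlen, rfl⟩,
      by simpa using hgear, dy, by dsimp only; omega, ⟨h0, h1⟩, dx,
      ⟨by dsimp only; omega, h2, h3, hdig⟩, rfl⟩

-- A's pairs are always among B's pairs
theorem pv_condA_condB (data : List (List String)) (q : (Int × Int) × (Int × Int))
    (h : pvPairCond data q) : pvPairCondB data q := by
  obtain ⟨dy, dx, gy, gx, rfl, h0, h1, h2, h3, hdig, a1, a2, a3, a4, h5, h6, h7, h8, hg⟩ := h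
  obtain ⟨g, rfl⟩ : ∃ g : ℕ, gy = ↑g := ⟨gy.toNat, (Int.toNat_of_nonneg (le_of_lt h5)).symm⟩
  have hkg : g < data.length := by exact_mod_cast h6
  have hrow : PySem.List.pyGetD data ((g : Nat) : Int) [] = data[g] := by
    rw [PySem.List.pyGetD_natCast]; exact List.getD_eq_getElem data [] hkg
  rw [pvIsGear, beq_iff_eq, hrow] at hg
  have hglen : gx < (data[g].length : Int) := by
    by_contra hcon
    push Not at hcon
    rw [show gx = ((gx.toNat : Nat) : Int) from by omega] at hg
    rw [PySem.List.pyGetD_natCast, List.getD_eq_default _ _ (by omega)] at hg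
    exact absurd hg (by decide)
  refine ⟨dy, dx, (g : Int), gx, rfl, by omega, h6, by omega, ?_, ?_, a1, a2, a3, a4,
    h0, h1, h2, h3, hdig⟩
  · rw [hrow]; exact hglen
  · rw [hrow]; exact hg

theorem pv_adjac_pairwise (x y : Int) :
    (pvAdjac x y).Pairwise (fun p q => p.2 < q.2 ∨ (p.2 = q.2 ∧ p.1 < q.1)) := by
  simp [pvAdjac, pvFlatten, List.pairwise_cons]

theorem pvA_shape (data : List (List String)) (y x : Int) (row : List String) (c : String)
    (q : (Int × Int) × (Int × Int))
    (hq : q ∈ (if PySem.Str.strIsdigit c = true then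
        ((pvAdjac x y).filter (fun p => decide (pvCondA data row p))).map
          (fun p => ((y, x), (p.2, p.1)))
      else [])) : q.1.1 = y ∧ q.1.2 = x := by
  split_ifs at hq
  · rw [List.mem_map] at hq
    obtain ⟨p, _, rfl⟩ := hq
    exact ⟨rfl, rfl⟩
  · simp at hq

theorem pvA_shape_top (data : List (List String)) (yr : Int × List String)
    (q : (Int × Int) × (Int × Int))
    (hq : q ∈ (PySem.List.enumerate yr.2 0).flatMap (fun xc =>
      if PySem.Str.strIsdigit xc.2 = true then
        ((pvAdjac xc.1 yr.1).filter (fun p => decide (pvCondA data yr.2 p))).map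
          (fun p => ((yr.1, xc.1), (p.2, p.1)))
      else [])) : q.1.1 = yr.1 := by
  rw [List.mem_flatMap] at hq
  obtain ⟨xc, _, hq⟩ := hq
  exact (pvA_shape data yr.1 xc.1 yr.2 xc.2 q hq).1

theorem pv_pairwiseA (data : List (List String)) :
    (pvAflat data).Pairwise (fun a b => pvKey a < pvKey b) := by
  unfold pvAflat
  apply pv_pairwise_flatMap
  · intro yr _
    apply pv_pairwise_flatMap
    · intro xc _
      split_ifs with hd
      · rw [List.pairwise_map]
        refine List.Pairwise.imp ?_
          (List.Pairwise.sublist List.filter_sublist (pv_adjac_pairwise xc.1 yr.1))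
        intro p q' hpq
        rw [pvKey_lt_iff]
        exact Or.inr ⟨rfl, Or.inr ⟨rfl, hpq⟩⟩
      · simp
    · refine (PySem.List.pairwise_lt_enumerate _ _).imp ?_
      intro xc1 xc2 hlt q1 hq1 q2 hq2
      obtain ⟨e1a, e1b⟩ := pvA_shape data yr.1 xc1.1 yr.2 xc1.2 q1 hq1
      obtain ⟨e2a, e2b⟩ := pvA_shape data yr.1 xc2.1 yr.2 xc2.2 q2 hq2
      rw [pvKey_lt_iff]
      exact Or.inr ⟨by rw [e1a, e2a], Or.inl (by rw [e1b, e2b]; exact hlt)⟩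
  · refine (PySem.List.pairwise_lt_enumerate _ _).imp ?_
    intro yr1 yr2 hlt q1 hq1 q2 hq2
    have e1 := pvA_shape_top data yr1 q1 hq1
    have e2 := pvA_shape_top data yr2 q2 hq2
    rw [pvKey_lt_iff]
    exact Or.inl (by rw [e1, e2]; exact hlt)

theorem pv_nodupA (data : List (List String)) : (pvAflat data).Nodup := by
  refine (pv_pairwiseA data).imp (fun {a b} h => ?_)
  intro hab; subst hab; exact lt_irrefl _ h

-- outside D_, every B-pair is an A-pair
theorem pv_condB_condA (data : List (List String)) (hD : ¬ D_coords_with_gear_nb data)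
    (q : (Int × Int) × (Int × Int)) (h : pvPairCondB data q) : pvPairCond data q := by
  obtain ⟨dy, dx, gy, gx, rfl, h5, h6, h7, h8, hgear, a1, a2, a3, a4, h0, h1, h2, h3, hdig⟩ := h
  obtain ⟨g, rfl⟩ : ∃ g : ℕ, gy = ↑g := ⟨gy.toNat, (Int.toNat_of_nonneg h5).symm⟩
  obtain ⟨x, rfl⟩ : ∃ x : ℕ, gx = ↑x := ⟨gx.toNat, (Int.toNat_of_nonneg h7).symm⟩
  obtain ⟨k, rfl⟩ : ∃ k : ℕ, dy = ↑k := ⟨dy.toNat, (Int.toNat_of_nonneg h0).symm⟩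
  obtain ⟨j, rfl⟩ : ∃ j : ℕ, dx = ↑j := ⟨dx.toNat, (Int.toNat_of_nonneg h2).symm⟩
  have hk : k < data.length := by exact_mod_cast h1
  have hg : g < data.length := by exact_mod_cast h6
  have h3' := h3; have h8' := h8; have hdig' := hdig; have hgear' := hgear
  simp only [PySem.List.pyGetD_natCast] at h3' h8' hdig' hgear'
  have hj : j < (data.getD k []).length := by exact_mod_cast h3'
  have hx : x < (data.getD g []).length := by exact_mod_cast h8'
  have hviol : ¬ (g = 0 ∨ x = 0 ∨ (data.getD k []).length ≤ x) := by
    intro hv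
    exact hD ⟨k, hk, j, hj, hdig', g, hg, x, hx, ⟨by omega, by omega⟩, ⟨by omega, by omega⟩, hgear', hv⟩
  push Not at hviol
  obtain ⟨hg0, hx0, hxk⟩ := hviol
  refine ⟨(k : Int), (j : Int), (g : Int), (x : Int), rfl, h0, h1, h2, h3, hdig, a1, a2, a3, a4,
    by omega, h6, by omega, by simp only [PySem.List.pyGetD_natCast]; exact_mod_cast hxk, ?_⟩
  rw [pvIsGear, beq_iff_eq]; exact hgear

-- shape of B's innermost block
theorem pvB_shape3 (data : List (List String)) (gy gx dy : Int)
    (q : (Int × Int) × (Int × Int))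
    (hq : q ∈ (if ¬ (0 ≤ dy ∧ dy < (data.length : Int)) then []
      else (([gx - 1, gx, gx + 1]).filter
          (fun dx => decide (pvCondB (PySem.List.pyGetD data dy []) dx))).map
        (fun dx => ((dy, dx), (gy, gx))))) :
    q.1.1 = dy ∧ q.2.1 = gy ∧ q.2.2 = gx := by
  split_ifs at hq
  · rw [List.mem_map] at hq
    obtain ⟨dx, _, rfl⟩ := hq
    exact ⟨rfl, rfl, rfl⟩
  · exact absurd hq List.not_mem_nil

theorem pvB_shape2 (data : List (List String)) (gy gx : Int)
    (q : (Int × Int) × (Int × Int))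
    (hq : q ∈ ([gy - 1, gy, gy + 1]).flatMap (fun dy =>
      if ¬ (0 ≤ dy ∧ dy < (data.length : Int)) then []
      else (([gx - 1, gx, gx + 1]).filter
          (fun dx => decide (pvCondB (PySem.List.pyGetD data dy []) dx))).map
        (fun dx => ((dy, dx), (gy, gx))))) :
    q.2.1 = gy ∧ q.2.2 = gx := by
  rw [List.mem_flatMap] at hq
  obtain ⟨dy, _, hq⟩ := hq
  exact (pvB_shape3 data gy gx dy q hq).2

theorem pvB_shape1 (data : List (List String)) (gy : Int) (grow : List String)
    (q : (Int × Int) × (Int × Int))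
    (hq : q ∈ (PySem.List.enumerate grow 0).flatMap (fun gxc =>
      if ¬ gxc.2 = "*" then []
      else ([gy - 1, gy, gy + 1]).flatMap (fun dy =>
        if ¬ (0 ≤ dy ∧ dy < (data.length : Int)) then []
        else (([gxc.1 - 1, gxc.1, gxc.1 + 1]).filter
            (fun dx => decide (pvCondB (PySem.List.pyGetD data dy []) dx))).map
          (fun dx => ((dy, dx), (gy, gxc.1)))))) :
    q.2.1 = gy := by
  rw [List.mem_flatMap] at hq
  obtain ⟨gxc, _, hq⟩ := hq
  split_ifs at hq
  · exact (pvB_shape2 data gy gxc.1 q hq).1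
  · exact absurd hq List.not_mem_nil

theorem pv_nodupB (data : List (List String)) : (pvBflat data).Nodup := by
  unfold pvBflat
  apply pv_pairwise_flatMap
  · intro gyr _
    apply pv_pairwise_flatMap
    · intro gxc _
      split_ifs with h1
      · apply pv_pairwise_flatMap
        · intro dy _
          have hdx3 : ([gxc.1 - 1, gxc.1, gxc.1 + 1]).Pairwise ((· < ·) : Int → Int → Prop) := by
            simp [List.pairwise_cons]
          split_ifs with h2
          · rw [List.pairwise_map]
            refine List.Pairwise.imp ?_ (List.Pairwise.sublist List.filter_sublist hdx3)
            intro dx1 dx2 hlt heq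
            have : dx1 = dx2 := congrArg (fun r => r.1.2) heq
            omega
          · simp
        · have h3 : ([gyr.1 - 1, gyr.1, gyr.1 + 1]).Pairwise ((· < ·) : Int → Int → Prop) := by
            simp [List.pairwise_cons]
          refine h3.imp ?_
          intro dy1 dy2 hlt q1 hq1 q2 hq2 heq
          have e1 := (pvB_shape3 data gyr.1 gxc.1 dy1 q1 hq1).1
          have e2 := (pvB_shape3 data gyr.1 gxc.1 dy2 q2 hq2).1
          have : q1.1.1 = q2.1.1 := congrArg (fun r => r.1.1) heq
          omega
      · simp
    · refine (PySem.List.pairwise_lt_enumerate _ _).imp ?_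
      intro gxc1 gxc2 hlt q1 hq1 q2 hq2 heq
      split_ifs at hq1
      · split_ifs at hq2
        · have e1 := (pvB_shape2 data gyr.1 gxc1.1 q1 hq1).2
          have e2 := (pvB_shape2 data gyr.1 gxc2.1 q2 hq2).2
          have : q1.2.2 = q2.2.2 := congrArg (fun r => r.2.2) heq
          omega
        · exact absurd hq2 List.not_mem_nil
      · exact absurd hq1 List.not_mem_nil
  · refine (PySem.List.pairwise_lt_enumerate _ _).imp ?_
    intro gyr1 gyr2 hlt q1 hq1 q2 hq2 heq
    have e1 := pvB_shape1 data gyr1.1 gyr1.2 q1 hq1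
    have e2 := pvB_shape1 data gyr2.1 gyr2.2 q2 hq2
    have : q1.2.1 = q2.2.1 := congrArg (fun r => r.2.1) heq
    omega

theorem pv_main (data : List (List String)) (hD : ¬ D_coords_with_gear_nb data) :
    coords_with_gear_nb data = coords_with_gear_nb_alt data := by
  rw [pvA_eq_flat, pvB_eq_sorted_flat]
  refine (PySem.List.sorted_eq_of_perm_of_pairwise_lt (pvBflat data) (pvAflat data) pvKey ?_ (pv_pairwiseA data)).symm
  refine (List.perm_ext_iff_of_nodup (pv_nodupA data) (pv_nodupB data)).mpr (fun q => ?_)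
  rw [pv_memA, pv_memB]
  exact ⟨pv_condA_condB data q, pv_condB_condA data hD q⟩

theorem pv_tight (data : List (List String)) (hd : D_coords_with_gear_nb data) :
    coords_with_gear_nb data ≠ coords_with_gear_nb_alt data := by
  obtain ⟨k, hk, j, hj, hdig, g, hg, x, hx, ⟨ha1, ha2⟩, ⟨ha3, ha4⟩, hstar, hviol⟩ := hd
  have hq0B : pvPairCondB data (((k : Int), (j : Int)), ((g : Int), (x : Int))) := by
    refine ⟨(k : Int), (j : Int), (g : Int), (x : Int), rfl, by omega, by exact_mod_cast hg,
      by omega, ?_, ?_, by omega, by omega, by omega, by omega, by omega, by exact_mod_cast hk,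
      by omega, ?_, ?_⟩
    · simp only [PySem.List.pyGetD_natCast]; exact_mod_cast hx
    · simp only [PySem.List.pyGetD_natCast]; exact hstar
    · simp only [PySem.List.pyGetD_natCast]; exact_mod_cast hj
    · simp only [PySem.List.pyGetD_natCast]; exact hdig
  have hq0A : ¬ pvPairCond data (((k : Int), (j : Int)), ((g : Int), (x : Int))) := by
    rintro ⟨dy, dx, gy, gx, heq, h0, h1, h2, h3, hdig', a1, a2, a3, a4, h5, h6, h7, h8, hg'⟩
    have e1 : ((k : Nat) : Int) = dy := congrArg (fun r => r.1.1) heq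
    have e3 : ((g : Nat) : Int) = gy := congrArg (fun r => r.2.1) heq
    have e4 : ((x : Nat) : Int) = gx := congrArg (fun r => r.2.2) heq
    subst e1; subst e3; subst e4
    simp only [PySem.List.pyGetD_natCast] at h8
    rcases hviol with hv | hv | hv
    · omega
    · omega
    · have hv' : (data.getD k []).length ≤ x := hv
      have : x < (data.getD k []).length := by exact_mod_cast h8
      omega
  have hsub : pvAflat data ⊆ pvBflat data := fun q hq =>
    (pv_memB data q).mpr (pv_condA_condB data q ((pv_memA data q).mp hq))
  have hlen : (pvAflat data).length < (pvBflat data).length := by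
    have h1 : ((((k : Int), (j : Int)), ((g : Int), (x : Int))) :: pvAflat data).Nodup :=
      List.nodup_cons.mpr ⟨fun hmem => hq0A ((pv_memA data _).mp hmem), pv_nodupA data⟩
    have h2 : ((((k : Int), (j : Int)), ((g : Int), (x : Int))) :: pvAflat data) ⊆ pvBflat data := by
      intro q hq
      rcases List.mem_cons.mp hq with rfl | hq
      · exact (pv_memB data _).mpr hq0B
      · exact hsub hq
    have := (List.Nodup.subperm h1 h2).length_le
    simpa using this
  intro heq
  have hl := congrArg List.length heq
  rw [pvA_eq_flat, pvB_eq_sorted_flat, PySem.List.length_sorted] at hl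
  omega

-- ===== VERDICT (by name: the statement is the Claim_ definition above) =====
theorem coords_with_gear_nb_spec : Claim_unchanged_coords_with_gear_nb := by
  intro data _ _
  unfold Spec_coords_with_gear_nb
  exact pv_main data

theorem coords_with_gear_nb_changed : Claim_changed_coords_with_gear_nb := by
  unfold Claim_changed_coords_with_gear_nb; decide

theorem coords_with_gear_nb_tight : Claim_exact_coords_with_gear_nb := by
  intro data _ _ hd
  exact pv_tight data hd
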